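-- pv_equiv track=rewrite | github.com/Mr-188/Software-testing | src/test2/rjcs.py | rjcs
-- ===== SOURCE A (Python) =====
-- def rjcs(i_count, i_flag):
--     i_temp = 0                          # 1
--     while i_count > 0:                  # 2
--         if 0 == i_flag:                 # 3
--             i_temp = i_count + 100      # 4
--             break                       # 5
--         else:
--             if 1 == i_flag:             # 6
--                 i_temp = i_temp + 10    # 7
--             else:
--                 i_temp = i_temp + 20    # 8
--         i_count = i_count - 1           # 9
--
--     return i_temp                       # 10
-- ===== SOURCE B (Python) =====
-- def rjcs(i_count, i_flag):
--     # Closed form: O(1) instead of O(i_count) loop.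
--     if i_count <= 0:
--         return 0
--     if i_flag == 0:
--         return i_count + 100
--     if i_flag == 1:
--         return 10 * i_count
--     return 20 * i_count
-- ===== Notes on version B (the rewrite author's own statement) =====
-- stated objective: faster
-- what changed: Replaced the counting-down loop by a closed-form case split (flag 0 short-circuits to i_count+100, otherwise the loop adds a constant i_count times, i.e. 10*i_count or 20*i_count).
import Mathlib
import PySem

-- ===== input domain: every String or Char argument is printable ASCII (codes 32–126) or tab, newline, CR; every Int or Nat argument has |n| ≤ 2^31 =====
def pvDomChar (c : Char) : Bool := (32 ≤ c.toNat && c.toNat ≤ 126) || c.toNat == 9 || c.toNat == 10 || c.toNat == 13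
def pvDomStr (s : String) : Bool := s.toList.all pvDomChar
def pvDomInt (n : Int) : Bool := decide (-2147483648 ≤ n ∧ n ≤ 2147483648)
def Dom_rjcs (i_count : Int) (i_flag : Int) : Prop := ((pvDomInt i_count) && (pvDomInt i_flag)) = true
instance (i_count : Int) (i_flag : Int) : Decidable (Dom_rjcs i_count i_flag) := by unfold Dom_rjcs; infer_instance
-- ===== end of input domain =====

-- B replaces A's counting-down loop by a closed-form case split on the flag: asymptotically faster (O(1) vs O(i_count)).


-- ===== PORT A =====
-- literal transliteration of A's while loop: state (i_count, i_temp), same branch order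
def rjcsLoop (i_count : Int) (i_flag : Int) (i_temp : Int) : Int :=
  if _h : i_count > 0 then
    if 0 == i_flag then
      i_count + 100
    else
      rjcsLoop (i_count - 1) i_flag (if 1 == i_flag then i_temp + 10 else i_temp + 20)
  else
    i_temp
termination_by i_count.toNat
decreasing_by omega

def rjcs (i_count : Int) (i_flag : Int) : Int := rjcsLoop i_count i_flag 0

-- ===== PORT B =====
def rjcs_alt (i_count : Int) (i_flag : Int) : Int :=
  if i_count ≤ 0 then 0
  else if i_flag == 0 then i_count + 100
  else if i_flag == 1 then 10 * i_count
  else 20 * i_count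

-- ===== PRECONDITION & SPEC =====
def Spec_rjcs (i_count : Int) (i_flag : Int) (out : Int) : Prop := out = rjcs_alt i_count i_flag
instance (i_count : Int) (i_flag : Int) (out : Int) : Decidable (Spec_rjcs i_count i_flag out) := by unfold Spec_rjcs; infer_instance

-- ===== CLAIM (what is proved, stated in full; the proofs are below) =====
def Claim_equal_rjcs : Prop := ∀ (i_count : Int) (i_flag : Int), Dom_rjcs i_count i_flag → Spec_rjcs i_count i_flag (rjcs i_count i_flag)

-- ===== LEMMAS AND PROOFS =====

-- loop invariant for a non-zero flag: the loop adds its per-step constant i_count times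
theorem rjcsLoop_nonzero (n : Nat) (i_count i_flag i_temp : Int)
    (hn : i_count = (n : Int)) (hf : i_flag ≠ 0) :
    rjcsLoop i_count i_flag i_temp =
      i_temp + (if i_flag == 1 then 10 else 20) * i_count := by
  induction n generalizing i_count i_temp with
  | zero => unfold rjcsLoop; simp [hn]
  | succ k ih =>
    unfold rjcsLoop
    have h0 : ¬ (0 == i_flag) = true := by simpa using fun h => hf h.symm
    rw [dif_pos (by omega : i_count > 0), if_neg h0,
        ih (i_count - 1) _ (by omega)]
    by_cases h1 : i_flag = 1
    · simp [h1]; ring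
    · simp [h1, if_neg (Ne.symm h1)]; ring

theorem rjcsLoop_zero_flag (n : Nat) (i_count : Int)
    (hn : i_count = (n : Int)) :
    rjcsLoop i_count 0 0 = if i_count ≤ 0 then 0 else i_count + 100 := by
  unfold rjcsLoop
  cases n with
  | zero => simp [hn]
  | succ k => rw [dif_pos (by omega : i_count > 0)]; simp; omega

-- ===== VERDICT (by name: the statement is the Claim_ definition above) =====
theorem rjcs_spec : Claim_equal_rjcs := by
  intro i_count i_flag _
  unfold Spec_rjcs rjcs rjcs_alt
  by_cases hneg : i_count ≤ 0
  · unfold rjcsLoop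
    rw [dif_neg (by omega)]
    simp [hneg]
  · obtain ⟨n, hn⟩ : ∃ n : Nat, i_count = (n : Int) :=
      ⟨i_count.toNat, by omega⟩
    by_cases hf : i_flag = 0
    · subst hf
      rw [rjcsLoop_zero_flag n _ hn]
      simp [hneg]
    · rw [rjcsLoop_nonzero n _ _ _ hn hf]
      have h1 : ¬ i_count ≤ 0 := hneg
      simp only [if_neg h1]
      by_cases h0 : i_flag = 0
      · exact absurd h0 hf
      · by_cases h1 : i_flag = 1 <;> simp [h0, h1]
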